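-- pv_equiv track=rewrite | github.com/akhilerm/Google-Foobar | hall.py | answer
-- ===== SOURCE A (Python) =====
-- def answer(s):
--     salutes = 0
--     people = 0
--     for person in s:
--         if person == '-':
--             continue
--         elif person == '>':
--             people+=1
--         else:
--             salutes+=people
--     return salutes*2
-- ===== SOURCE B (Python) =====
-- def answer(s):
--     # Direct pair-counting: for each right-walker, count the walkers it will
--     # meet further down the hall (anyone who is neither '>' nor empty '-').
--     count = 0
--     n = len(s)
--     for i in range(n):
--         if s[i] == '>':
--             for j in range(i + 1, n):
--                 if s[j] != '>' and s[j] != '-':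
--                     count += 1
--     return count * 2
-- ===== Notes on version B (the rewrite author's own statement) =====
-- stated objective: alternative
-- what changed: Replaces A's single pass with a running people-counter by direct pair counting: a nested double loop that, for each '>' at position i, scans the suffix and counts every later character that is not '>' and not '-' (A's else-branch saluters), then doubles the total.
import Mathlib
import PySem

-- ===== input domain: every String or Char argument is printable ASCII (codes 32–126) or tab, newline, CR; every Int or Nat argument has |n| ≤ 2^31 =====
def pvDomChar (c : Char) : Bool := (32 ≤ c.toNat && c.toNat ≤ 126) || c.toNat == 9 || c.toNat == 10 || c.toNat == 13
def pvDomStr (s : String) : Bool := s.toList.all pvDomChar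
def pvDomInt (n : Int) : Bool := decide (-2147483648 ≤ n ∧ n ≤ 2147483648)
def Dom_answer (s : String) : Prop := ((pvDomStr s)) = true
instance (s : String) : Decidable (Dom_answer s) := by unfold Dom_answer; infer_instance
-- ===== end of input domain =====

-- B replaces A's one-pass running counter with a nested double loop that counts
-- crossing pairs directly (alternative decomposition; not faster — O(n^2) vs O(n)).

-- ===== PORT A =====
-- state = (salutes, people), folded over the characters of s
def answerStep (p : Int × Int) (c : Char) : Int × Int :=
  if c = '-' then p
  else if c = '>' then (p.1, p.2 + 1)
  else (p.1 + p.2, p.2)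

def answer (s : String) : Int :=
  (s.toList.foldl answerStep (0, 0)).1 * 2

-- ===== PORT B =====
-- inner loop: count later characters that are neither '>' nor '-'
def altInner : List Char → Int
  | [] => 0
  | c :: rest => (if c ≠ '>' ∧ c ≠ '-' then 1 else 0) + altInner rest

-- outer loop: for each '>' add the inner count over the remaining suffix
def altOuter : List Char → Int
  | [] => 0
  | c :: rest => (if c = '>' then altInner rest else 0) + altOuter rest

def answer_alt (s : String) : Int :=
  altOuter s.toList * 2

-- ===== PRECONDITION & SPEC =====
def Spec_answer (s : String) (out : Int) : Prop := out = answer_alt s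
instance (s : String) (out : Int) : Decidable (Spec_answer s out) := by unfold Spec_answer; infer_instance

-- ===== CLAIM (what is proved, stated in full; the proofs are below) =====
def Claim_equal_answer : Prop := ∀ (s : String), Dom_answer s → Spec_answer s (answer s)

-- ===== LEMMAS AND PROOFS =====

-- fold invariant: first component = initial salutes + people·(saluters in l) + pair count of l
theorem answer_fold_inv (l : List Char) (a b : Int) :
    (l.foldl answerStep (a, b)).1 = a + b * altInner l + altOuter l := by
  induction l generalizing a b with
  | nil => simp [altInner, altOuter]
  | cons c rest ih =>
    by_cases h1 : c = '-'
    · simp [answerStep, altInner, altOuter, h1, ih]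
    · by_cases h2 : c = '>'
      · simp [answerStep, altInner, altOuter, h1, h2, ih]; ring
      · simp [answerStep, altInner, altOuter, h1, h2, ih]; ring

-- ===== VERDICT (by name: the statement is the Claim_ definition above) =====
theorem answer_spec : Claim_equal_answer := by
  intro s _
  unfold Spec_answer answer answer_alt
  rw [answer_fold_inv]
  ring
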